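-- pv_equiv track=rewrite | github.com/ragart/gitpkm | scripts/export/export_public_snapshot.py | should_drop_row
-- ===== SOURCE A (Python) =====
-- from typing import Dict, List, Tuple, Set
--
-- def should_drop_row(row: Dict[str, str], private_ids: Set[str]) -> bool:
--     row_id = (row.get("id") or "").strip()
--     if row_id and row_id in private_ids:
--         return True
--
--     for key, value in row.items():
--         if key.endswith("_id") and (value or "").strip() in private_ids:
--             return True
--
--     return False
-- ===== SOURCE B (Python) =====
-- def should_drop_row(row, private_ids):
--     # Index the row's candidate id values once, then scan the private ids
--     # against that index (lookup direction inverted w.r.t. the original).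
--     candidates = {(value or "").strip() for key, value in row.items() if key.endswith("_id")}
--     rid = (row.get("id") or "").strip()
--     if rid:
--         candidates.add(rid)
--     return any(pid in candidates for pid in private_ids)
-- ===== Notes on version B (the rewrite author's own statement) =====
-- stated objective: alternative
-- what changed: Inverts the lookup direction: A scans the row and tests each stripped value for membership in private_ids with early return; B first builds a set index of the row's candidate id values (set comprehension over _id keys, plus a truthy id), then scans private_ids testing each against that index.
import Mathlib
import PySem

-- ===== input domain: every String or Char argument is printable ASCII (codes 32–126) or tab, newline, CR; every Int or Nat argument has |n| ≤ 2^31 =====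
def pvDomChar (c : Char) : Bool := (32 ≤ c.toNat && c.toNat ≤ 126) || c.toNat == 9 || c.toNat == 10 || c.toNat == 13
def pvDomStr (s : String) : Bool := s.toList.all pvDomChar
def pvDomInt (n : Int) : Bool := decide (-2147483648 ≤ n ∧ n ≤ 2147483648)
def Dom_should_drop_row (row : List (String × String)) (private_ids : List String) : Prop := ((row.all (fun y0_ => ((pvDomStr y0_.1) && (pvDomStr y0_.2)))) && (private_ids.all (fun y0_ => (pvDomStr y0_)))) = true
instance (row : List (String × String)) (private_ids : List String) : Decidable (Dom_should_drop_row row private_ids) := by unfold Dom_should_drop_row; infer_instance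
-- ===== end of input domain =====

-- B inverts the lookup direction: it indexes the row's candidate id values in a set, then scans private_ids against that index (A scans the row testing membership in private_ids).

-- ===== PORT A =====
def should_drop_row (row : List (String × String)) (private_ids : List String) : Bool :=
  let row_id := PySem.Str.strip ((PySem.Dict.ofList row).getD "id" "")
  if row_id ≠ "" && private_ids.contains row_id then true
  else
    (PySem.Dict.ofList row).items.any
      (fun kv => PySem.Str.endswith kv.1 "_id" && private_ids.contains (PySem.Str.strip kv.2))

-- ===== PORT B =====
def should_drop_row_alt (row : List (String × String)) (private_ids : List String) : Bool :=
  -- set comprehension over the row's _id-keyed values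
  let cands0 : PySem.Set String :=
    (PySem.Dict.ofList row).items.foldl
      (fun s kv => if PySem.Str.endswith kv.1 "_id" then PySem.Set.add s (PySem.Str.strip kv.2) else s)
      PySem.Set.empty
  let rid := PySem.Str.strip ((PySem.Dict.ofList row).getD "id" "")
  let candidates := if rid ≠ "" then PySem.Set.add cands0 rid else cands0
  private_ids.any (fun pid => PySem.Set.contains candidates pid)

-- ===== PRECONDITION & SPEC =====
def Spec_should_drop_row (row : List (String × String)) (private_ids : List String) (out : Bool) : Prop := out = should_drop_row_alt row private_ids
instance (row : List (String × String)) (private_ids : List String) (out : Bool) : Decidable (Spec_should_drop_row row private_ids out) := by unfold Spec_should_drop_row; infer_instance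

-- ===== CLAIM (what is proved, stated in full; the proofs are below) =====
def Claim_equal_should_drop_row : Prop := ∀ (row : List (String × String)) (private_ids : List String), Dom_should_drop_row row private_ids → Spec_should_drop_row row private_ids (should_drop_row row private_ids)

-- ===== LEMMAS AND PROOFS =====

-- membership in the candidate set built by B's fold
theorem mem_cands_foldl (items : List (String × String)) (s : PySem.Set String) (x : String) :
    x ∈ items.foldl
        (fun s kv => if PySem.Str.endswith kv.1 "_id" then PySem.Set.add s (PySem.Str.strip kv.2) else s) s
      ↔ x ∈ s ∨ ∃ kv ∈ items, PySem.Str.endswith kv.1 "_id" = true ∧ x = PySem.Str.strip kv.2 := by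
  induction items generalizing s with
  | nil => simp
  | cons kv rest ih =>
    simp only [List.foldl_cons]
    by_cases h : PySem.Str.endswith kv.1 "_id" = true
    · rw [if_pos h, ih]
      simp [PySem.Set.mem_add]
      tauto
    · rw [if_neg h, ih]
      simp only [List.mem_cons]
      constructor
      · rintro (hs | ⟨p, hp, he, hx⟩)
        · exact Or.inl hs
        · exact Or.inr ⟨p, Or.inr hp, he, hx⟩
      · rintro (hs | ⟨p, (rfl | hp), he, hx⟩)
        · exact Or.inl hs
        · exact absurd he h
        · exact Or.inr ⟨p, hp, he, hx⟩

-- ===== VERDICT (by name: the statement is the Claim_ definition above) =====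
theorem should_drop_row_spec : Claim_equal_should_drop_row := by
  intro row private_ids _
  unfold Spec_should_drop_row should_drop_row should_drop_row_alt
  dsimp only
  set rid := PySem.Str.strip ((PySem.Dict.ofList row).getD "id" "") with hrid
  set items := (PySem.Dict.ofList row).items with hitems
  rw [Bool.eq_iff_iff]
  simp only [List.any_eq_true, PySem.Set.contains, List.contains_iff_mem]
  constructor
  · intro h
    split_ifs at h with hc
    · -- the id branch fired: rid is indexed and lies in private_ids
      simp only [Bool.and_eq_true, ne_eq, decide_eq_true_eq, List.contains_iff_mem] at hc
      obtain ⟨hne, hmem⟩ := hc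
      exact ⟨rid, by simpa using hmem, by
        rw [if_pos (by simpa using hne)]
        simp [PySem.Set.mem_add]⟩
    · simp only [List.any_eq_true, Bool.and_eq_true, List.contains_iff_mem] at h
      obtain ⟨kv, hkv, he, hmem⟩ := h
      refine ⟨PySem.Str.strip kv.2, by simpa using hmem, ?_⟩
      have hin : PySem.Str.strip kv.2 ∈ items.foldl
          (fun s kv => if PySem.Str.endswith kv.1 "_id" then PySem.Set.add s (PySem.Str.strip kv.2) else s)
          PySem.Set.empty :=
        (mem_cands_foldl _ _ _).mpr (Or.inr ⟨kv, hkv, he, rfl⟩)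
      split_ifs
      · simpa [PySem.Set.mem_add] using Or.inl hin
      · simpa using hin
  · rintro ⟨x, hxp, hx⟩
    have hxp' : x ∈ private_ids := by simpa using hxp
    by_cases hne : rid ≠ ""
    · rw [if_pos (by simpa using hne)] at hx
      simp only [PySem.Set.mem_add] at hx
      rcases hx with hx0 | rfl
      · rcases (mem_cands_foldl _ _ _).mp hx0 with h0 | ⟨kv, hkv, he, rfl⟩
        · simp [PySem.Set.empty] at h0
        · split_ifs with hc
          · rfl
          · simp only [List.any_eq_true, Bool.and_eq_true, List.contains_iff_mem]
            exact ⟨kv, hkv, he, hxp'⟩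
      · rw [if_pos]
        simp only [Bool.and_eq_true, ne_eq, decide_eq_true_eq, List.contains_iff_mem]
        exact ⟨by simpa using hne, hxp'⟩
    · rw [if_neg (by simpa using hne)] at hx
      rcases (mem_cands_foldl _ _ _).mp hx with h0 | ⟨kv, hkv, he, rfl⟩
      · simp [PySem.Set.empty] at h0
      · split_ifs with hc
        · rfl
        · simp only [List.any_eq_true, Bool.and_eq_true, List.contains_iff_mem]
          exact ⟨kv, hkv, he, hxp'⟩
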